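-- pv_equiv track=rewrite | github.com/airtnqls/Shapez2-Analytics-tools | data_operations.py | cornerize_shape
-- ===== SOURCE A (Python) =====
-- def cornerize_shape(shape_code: str) -> str:
--     """도형을 코너화합니다 - 모든 문자 사이에 ':' 추가 (색코드 제외)"""
--     try:
--         # 색코드 정의
--         color_codes = {'r', 'g', 'b', 'm', 'c', 'y', 'u', 'w'}
--
--         # 기존 ':'를 제거
--         cleaned_code = shape_code.replace(':', '')
--         if not cleaned_code:
--             return ""
--
--         # c를 제외한 색코드 정의
--         non_c_color_codes = {'r', 'g', 'b', 'm', 'y', 'u', 'w'}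
--
--         # c를 제외한 색코드가 하나라도 있는지 확인
--         has_non_c_color_codes = any(char in non_c_color_codes for char in cleaned_code)
--
--         result = ""
--         if has_non_c_color_codes:
--             # c를 제외한 색코드가 발견된 경우: 두 글자마다 ':' 배치
--             for i, char in enumerate(cleaned_code):
--                 if i == 0:
--                     result += char
--                 else:
--                     # 짝수번째 글자 앞에만 ':' 추가 (0부터 시작하므로 짝수 인덱스가 첫번째 글자)
--                     if i % 2 == 0:
--                         result += ':'
--                     result += char
--         else:
--             # c를 제외한 색코드가 발견되지 않은 경우: 한 글자마다 ':' 배치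
--             result = ':'.join(cleaned_code)
--
--         return result
--     except Exception as e:
--         return f"오류: {str(e)}"
-- ===== SOURCE B (Python) =====
-- def cornerize_shape(shape_code: str) -> str:
--     """Cornerize a shape code: one unified chunk-size pass (simpler than A's two-branch version)."""
--     try:
--         cleaned_code = shape_code.replace(':', '')
--         if not cleaned_code:
--             return ""
--         non_c_color_codes = {'r', 'g', 'b', 'm', 'y', 'u', 'w'}
--         size = 2 if any(c in non_c_color_codes for c in cleaned_code) else 1
--         chunks = []
--         i = 0
--         while i < len(cleaned_code):
--             chunks.append(cleaned_code[i:i + size])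
--             i += size
--         return ':'.join(chunks)
--     except Exception as e:
--         return f"오류: {str(e)}"
-- ===== Notes on version B (the rewrite author's own statement) =====
-- stated objective: simpler
-- what changed: Replaces A's two-way branch (an index-parity accumulator loop for the two-wide case vs a separate per-character join) by one unified pass: compute a chunk size (2 or 1), cut the cleaned code into fixed-size chunks with an index loop and join the chunks with the separator.
import Mathlib
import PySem

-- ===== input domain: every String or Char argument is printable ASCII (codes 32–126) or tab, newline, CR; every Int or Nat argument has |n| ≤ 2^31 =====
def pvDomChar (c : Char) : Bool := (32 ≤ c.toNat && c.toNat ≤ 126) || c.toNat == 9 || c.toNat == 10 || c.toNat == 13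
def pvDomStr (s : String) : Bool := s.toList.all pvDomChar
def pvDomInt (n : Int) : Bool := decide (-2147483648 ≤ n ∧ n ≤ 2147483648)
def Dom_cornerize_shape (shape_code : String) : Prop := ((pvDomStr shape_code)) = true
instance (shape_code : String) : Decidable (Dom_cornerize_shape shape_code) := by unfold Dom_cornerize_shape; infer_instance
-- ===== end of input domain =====

-- B replaces A's two-branch structure (index-parity accumulator loop vs separate join of single
-- characters) by one unified chunk-size pass (objective: simpler). A's try/except cannot fire for a
-- str argument, so both functions are total.

-- ===== PORT A =====
-- the 'for i, char in enumerate(cleaned_code)' loop of A, with its accumulator string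
def pvALoop : Nat → List Char → List Char → List Char
  | _, acc, [] => acc
  | i, acc, c :: rest =>
    if i = 0 then pvALoop (i+1) (acc ++ [c]) rest
    else if i % 2 = 0 then pvALoop (i+1) (acc ++ [':', c]) rest
    else pvALoop (i+1) (acc ++ [c]) rest

def cornerize_shape (shape_code : String) : String :=
  let cleaned := PySem.Str.replace shape_code ":" ""
  if cleaned = "" then ""
  else
    let nonC : PySem.Set Char := PySem.Set.ofList ['r','g','b','m','y','u','w']
    let hasNonC := cleaned.toList.any (fun ch => decide (ch ∈ nonC))
    if hasNonC then
      String.ofList (pvALoop 0 [] cleaned.toList)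
    else
      PySem.Str.join ":" (cleaned.toList.map (fun ch => String.ofList [ch]))

-- ===== PORT B =====
-- the 'while i < len(cleaned_code): chunks.append(cleaned_code[i:i+size]); i += size' loop of B
def pvBLoop (size : Nat) (hs : 0 < size) (l : List Char) (i : Nat) (acc : List (List Char)) :
    List (List Char) :=
  if i < l.length then
    pvBLoop size hs l (i + size)
      (acc ++ [PySem.List.slice l (some (i : Int)) (some ((i : Int) + (size : Int)))])
  else acc
termination_by l.length - i
decreasing_by omega

def cornerize_shape_alt (shape_code : String) : String :=
  let cleaned := PySem.Str.replace shape_code ":" ""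
  if cleaned = "" then ""
  else
    let nonC : PySem.Set Char := PySem.Set.ofList ['r','g','b','m','y','u','w']
    let size : Nat := if cleaned.toList.any (fun ch => decide (ch ∈ nonC)) then 2 else 1
    have hs : 0 < size := by unfold size; split <;> omega
    PySem.Str.join ":" ((pvBLoop size hs cleaned.toList 0 []).map (fun ch => String.ofList ch))

-- ===== PRECONDITION & SPEC =====
def Spec_cornerize_shape (shape_code : String) (out : String) : Prop := out = cornerize_shape_alt shape_code
instance (shape_code : String) (out : String) : Decidable (Spec_cornerize_shape shape_code out) := by unfold Spec_cornerize_shape; infer_instance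

-- ===== CLAIM (what is proved, stated in full; the proofs are below) =====
def Claim_equal_cornerize_shape : Prop := ∀ (shape_code : String), Dom_cornerize_shape shape_code → Spec_cornerize_shape shape_code (cornerize_shape shape_code)

-- ===== LEMMAS AND PROOFS =====

-- fixed-size chunking of a list (proof-layer view of B's loop)
def pvBChunks (size : Nat) : List Char → List (List Char)
  | [] => []
  | c :: rest => ((c :: rest).take size) :: pvBChunks size (rest.drop (size - 1))
termination_by l => l.length
decreasing_by simp [List.length_drop]

theorem pvBChunks_nil (size : Nat) : pvBChunks size [] = [] := by
  conv_lhs => rw [pvBChunks.eq_def]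

theorem pvBChunks_cons (size : Nat) (c : Char) (rest : List Char) :
    pvBChunks size (c :: rest) = ((c :: rest).take size) :: pvBChunks size (rest.drop (size - 1)) := by
  conv_lhs => rw [pvBChunks.eq_def]

theorem pvBLoop_eq (size : Nat) (hs : 0 < size) (l : List Char) (i : Nat) (acc : List (List Char)) :
    pvBLoop size hs l i acc = acc ++ pvBChunks size (l.drop i) := by
  rw [pvBLoop.eq_def]
  split
  · rename_i h
    rw [pvBLoop_eq size hs l (i + size)]
    have hd : l.drop i ≠ [] := by
      simp only [ne_eq, List.drop_eq_nil_iff]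
      omega
    obtain ⟨c, rest, hcr⟩ := List.exists_cons_of_ne_nil hd
    have h2 : l.drop (i + size) = rest.drop (size - 1) := by
      rw [← List.drop_drop, hcr, show (c :: rest).drop size = rest.drop (size - 1) by
        cases size with
        | zero => omega
        | succ k => simp]
    rw [PySem.List.slice_natCast_add, hcr, h2, pvBChunks_cons]
    simp
  · rename_i h
    have hnil : l.drop i = [] := by
      simp only [List.drop_eq_nil_iff]
      omega
    simp [hnil, pvBChunks_nil]
termination_by l.length - i
decreasing_by omega

-- the value of A's loop from any index i ≥ 1, with the accumulator factored out
def pvTail : Nat → List Char → List Char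
  | _, [] => []
  | p, c :: rest => (if p % 2 = 0 then [':', c] else [c]) ++ pvTail (p+1) rest

theorem pvALoop_eq_tail : ∀ (l : List Char) (i : Nat) (acc : List Char), 1 ≤ i →
    pvALoop i acc l = acc ++ pvTail i l := by
  intro l
  induction l with
  | nil => intro i acc _; simp [pvALoop, pvTail]
  | cons c rest ih =>
    intro i acc hi
    have hi0 : i ≠ 0 := by omega
    by_cases h : i % 2 = 0 <;>
      simp [pvALoop, pvTail, hi0, h, ih (i+1) _ (by omega)]

theorem pvTail_parity : ∀ (l : List Char) (i j : Nat), i % 2 = j % 2 → pvTail i l = pvTail j l := by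
  intro l
  induction l with
  | nil => intro i j _; rfl
  | cons c rest ih =>
    intro i j h
    simp only [pvTail, h, ih (i+1) (j+1) (by omega)]

theorem pvTail_even_eq_chunks : ∀ (l : List Char),
    pvTail 2 l = if l = [] then [] else ':' :: PySem.Chars.join [':'] (pvBChunks 2 l)
  | [] => by simp [pvTail]
  | [e] => by
      simp [pvTail, pvBChunks_cons, pvBChunks_nil, PySem.Chars.join, List.intercalate]
  | e :: f :: r => by
      have ih := pvTail_even_eq_chunks r
      have hlhs : pvTail 2 (e :: f :: r) = ':' :: e :: f :: pvTail 2 r := by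
        simp [pvTail, pvTail_parity r 4 2 rfl]
      rcases eq_or_ne r ([] : List Char) with hr | hr
      · subst hr
        simp [pvTail, pvBChunks_cons, pvBChunks_nil, PySem.Chars.join, List.intercalate]
      · obtain ⟨g, r', rfl⟩ := List.exists_cons_of_ne_nil hr
        rw [if_neg (List.cons_ne_nil _ _), hlhs, ih, if_neg (List.cons_ne_nil _ _)]
        rw [pvBChunks_cons 2 e]
        rw [show ((e :: f :: g :: r').take 2) = [e, f] from rfl]
        rw [show ((f :: g :: r').drop (2 - 1)) = g :: r' from rfl]
        rw [pvBChunks_cons 2 g]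
        rw [PySem.Chars.join_cons_cons]
        simp

theorem pvBChunks_one : ∀ (l : List Char), pvBChunks 1 l = l.map (fun c => [c]) := by
  intro l
  induction l with
  | nil => exact pvBChunks_nil 1
  | cons c rest ih => simp [pvBChunks_cons, ih]

theorem pvMain2 : ∀ (l : List Char), l ≠ [] →
    pvALoop 0 [] l = PySem.Chars.join [':'] (pvBChunks 2 l) := by
  intro l hl
  obtain ⟨c, rest, rfl⟩ := List.exists_cons_of_ne_nil hl
  have h0 : pvALoop 0 [] (c :: rest) = [c] ++ pvTail 1 rest := by
    simp [pvALoop, pvALoop_eq_tail rest 1 [c] le_rfl]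
  rcases eq_or_ne rest ([] : List Char) with hr | hr
  · subst hr
    simp [h0, pvTail, pvBChunks_cons, pvBChunks_nil, PySem.Chars.join, List.intercalate]
  · obtain ⟨d, r, rfl⟩ := List.exists_cons_of_ne_nil hr
    have h1 : pvTail 1 (d :: r) = d :: pvTail 2 r := by simp [pvTail]
    rw [h0, h1, pvTail_even_eq_chunks r]
    rw [pvBChunks_cons 2 c]
    rw [show ((c :: d :: r).take 2) = [c, d] from rfl]
    rw [show ((d :: r).drop (2 - 1)) = r from rfl]
    rcases eq_or_ne r ([] : List Char) with hr2 | hr2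
    · subst hr2
      simp [pvBChunks_nil, PySem.Chars.join, List.intercalate]
    · obtain ⟨g, r', rfl⟩ := List.exists_cons_of_ne_nil hr2
      rw [if_neg (List.cons_ne_nil _ _)]
      rw [pvBChunks_cons 2 g]
      rw [PySem.Chars.join_cons_cons]
      simp

-- ===== VERDICT (by name: the statement is the Claim_ definition above) =====
theorem cornerize_shape_spec : Claim_equal_cornerize_shape := by
  intro s _hdom
  show cornerize_shape s = cornerize_shape_alt s
  unfold cornerize_shape cornerize_shape_alt
  by_cases h0 : PySem.Str.replace s ":" "" = ""
  · simp [h0]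
  · have hne : (PySem.Str.replace s ":" "").toList ≠ [] := by
      intro h
      exact h0 (String.toList_inj.mp (by simpa using h))
    have hsep : (":" : String).toList = [':'] := by decide
    by_cases h1 : (PySem.Str.replace s ":" "").toList.any
        (fun ch => decide (ch ∈ PySem.Set.ofList ['r','g','b','m','y','u','w'])) = true
    · simp only [h0, if_false, h1, if_true]
      rw [pvMain2 _ hne, pvBLoop_eq]
      refine String.toList_inj.mp ?_
      simp [List.map_map, Function.comp_def, hsep]
    · have h1' : ((PySem.Str.replace s ":" "").toList.any
          (fun ch => decide (ch ∈ PySem.Set.ofList ['r','g','b','m','y','u','w']))) = false := by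
        simpa using h1
      simp only [h0, if_false, h1', Bool.false_eq_true, if_false]
      rw [pvBLoop_eq]
      simp only [List.drop_zero, List.nil_append]
      rw [pvBChunks_one]
      simp [List.map_map, Function.comp_def]
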